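-- pv_equiv track=rewrite | github.com/carlandreolsen/INFO132 | col020_oblig5/col020_oblig5_oppgave2.py | funksjon3
-- ===== SOURCE A (Python) =====
-- def funksjon3(minListe, divTall=[], zeroCount = 0, hitCount = 0):
--     for i in minListe:
--         if i == 0:
--             zeroCount+=1
--             if zeroCount == 2:
--                 return hitCount
--         if i < 0:
--             hitCount+=1
--             continue
--         if i%2:
--             hitCount+=1
-- ===== SOURCE B (Python) =====
-- def funksjon3(minListe, divTall=[], zeroCount=0, hitCount=0):
--     # Locate-then-count: find the zero that brings the running zero count to 2,
--     # then count negatives/odds in the prefix before it.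
--     k = 2 - zeroCount
--     if k >= 1:
--         seen = 0
--         for idx, v in enumerate(minListe):
--             if v == 0:
--                 seen += 1
--                 if seen == k:
--                     return hitCount + sum(1 for x in minListe[:idx] if x < 0 or x % 2)
--     return None
-- ===== Notes on version B (the rewrite author's own statement) =====
-- stated objective: alternative
-- what changed: Replaces A's single stateful scan (zero counter and hit counter updated together) by a locate-then-count decomposition: first find the zero that makes the running zero count reach 2, then count negatives/odds in the prefix before it.
import Mathlib
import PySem

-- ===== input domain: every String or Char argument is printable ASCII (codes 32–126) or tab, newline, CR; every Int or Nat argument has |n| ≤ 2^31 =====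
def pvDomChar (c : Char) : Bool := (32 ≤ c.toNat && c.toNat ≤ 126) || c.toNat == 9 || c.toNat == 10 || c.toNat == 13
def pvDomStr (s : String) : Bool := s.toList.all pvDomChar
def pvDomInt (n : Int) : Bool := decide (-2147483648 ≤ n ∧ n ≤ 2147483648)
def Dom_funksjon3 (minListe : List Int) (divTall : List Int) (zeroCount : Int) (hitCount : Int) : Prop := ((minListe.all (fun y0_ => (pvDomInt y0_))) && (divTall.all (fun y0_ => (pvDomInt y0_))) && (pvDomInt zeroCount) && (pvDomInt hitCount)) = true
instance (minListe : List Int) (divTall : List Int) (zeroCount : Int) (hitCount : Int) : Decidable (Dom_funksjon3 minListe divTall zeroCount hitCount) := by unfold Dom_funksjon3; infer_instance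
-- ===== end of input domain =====

-- B replaces A's single stateful scan by a locate-then-count decomposition (same cost, different structure).

-- ===== PORT A =====
-- literal transliteration of A's single loop: zero counter, early return, negative/odd hit counter
def funksjon3 (minListe : List Int) (divTall : List Int) (zeroCount : Int) (hitCount : Int) : Option Int :=
  match minListe with
  | [] => none
  | i :: rest =>
    let z := if i = 0 then zeroCount + 1 else zeroCount
    if i = 0 ∧ z = 2 then some hitCount
    else if i < 0 then funksjon3 rest divTall z (hitCount + 1)
    else if PySem.Int.mod i 2 ≠ 0 then funksjon3 rest divTall z (hitCount + 1)
    else funksjon3 rest divTall z hitCount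

-- ===== PORT B =====
-- index of the zero that makes the running zero count reach k (B's locating loop)
def kthZeroIdx (xs : List Int) (k : Int) : Option Nat :=
  match xs with
  | [] => none
  | x :: rest =>
    if x = 0 then
      if k = 1 then some 0 else (kthZeroIdx rest (k - 1)).map (· + 1)
    else (kthZeroIdx rest k).map (· + 1)

-- minListe[:idx] with idx ≥ 0 is List.take idx; the generator-sum is countP
def funksjon3_alt (minListe : List Int) (divTall : List Int) (zeroCount : Int) (hitCount : Int) : Option Int :=
  let k := 2 - zeroCount
  if 1 ≤ k then
    match kthZeroIdx minListe k with
    | some idx =>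
        some (hitCount + ((minListe.take idx).countP
          (fun x => decide (x < 0 ∨ PySem.Int.mod x 2 ≠ 0)) : Int))
    | none => none
  else none

-- ===== PRECONDITION & SPEC =====
def Spec_funksjon3 (minListe : List Int) (divTall : List Int) (zeroCount : Int) (hitCount : Int) (out : Option Int) : Prop := out = funksjon3_alt minListe divTall zeroCount hitCount
instance (minListe : List Int) (divTall : List Int) (zeroCount : Int) (hitCount : Int) (out : Option Int) : Decidable (Spec_funksjon3 minListe divTall zeroCount hitCount out) := by unfold Spec_funksjon3; infer_instance

-- ===== CLAIM (what is proved, stated in full; the proofs are below) =====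
def Claim_equal_funksjon3 : Prop := ∀ (minListe : List Int) (divTall : List Int) (zeroCount : Int) (hitCount : Int), Dom_funksjon3 minListe divTall zeroCount hitCount → Spec_funksjon3 minListe divTall zeroCount hitCount (funksjon3 minListe divTall zeroCount hitCount)

-- ===== LEMMAS AND PROOFS =====

lemma alt_cons_zero_hit (rest divTall : List Int) (h : Int) :
    funksjon3_alt (0 :: rest) divTall 1 h = some h := by
  simp [funksjon3_alt, kthZeroIdx]

lemma alt_cons_zero (rest divTall : List Int) (z h : Int) (hz : z ≠ 1) :
    funksjon3_alt ((0 : Int) :: rest) divTall z h = funksjon3_alt rest divTall (z + 1) h := by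
  unfold funksjon3_alt
  by_cases hk : 1 ≤ 2 - z
  · have hk1 : (2 : Int) - z ≠ 1 := by omega
    have hk' : 1 ≤ 2 - (z + 1) := by omega
    have he : (2 : Int) - (z + 1) = (2 - z) - 1 := by ring
    rw [he]
    simp only [hk, if_pos, kthZeroIdx, if_neg hk1]
    have hkb : (1 : Int) ≤ 2 - z - 1 := by omega
    rw [if_pos hkb]
    cases hrec : kthZeroIdx rest (2 - z - 1) with
    | none => simp
    | some idx =>
        simp [List.take_succ_cons]
  · have hk' : ¬ (1 : Int) ≤ 2 - (z + 1) := by omega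
    rw [if_neg hk, if_neg hk']

lemma alt_cons_nonzero (x : Int) (rest divTall : List Int) (z h : Int) (hx : x ≠ 0) :
    funksjon3_alt (x :: rest) divTall z h =
      funksjon3_alt rest divTall z (if x < 0 ∨ PySem.Int.mod x 2 ≠ 0 then h + 1 else h) := by
  unfold funksjon3_alt
  by_cases hk : 1 ≤ 2 - z
  · simp only [hk, if_pos, kthZeroIdx, if_neg hx]
    cases hrec : kthZeroIdx rest (2 - z) with
    | none => simp
    | some idx =>
        simp only [Option.map_some, List.take_succ_cons, List.countP_cons]
        have hme : PySem.Int.mod x 2 = x % 2 := PySem.Int.mod_eq_emod_of_pos (by norm_num)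
        by_cases hp : x < 0 ∨ PySem.Int.mod x 2 ≠ 0
        · have hp' : x < 0 ∨ x % 2 = 1 := by
            rcases hp with hp | hp
            · exact Or.inl hp
            · right; rw [hme] at hp; omega
          simp [hp']
          ring
        · have hp' : ¬ (x < 0 ∨ x % 2 = 1) := by
            rw [not_or] at hp ⊢
            refine ⟨hp.1, ?_⟩
            have := hp.2
            rw [hme] at this
            omega
          simp [hp']
  · simp [hk]

lemma funksjon3_eq_alt (minListe divTall : List Int) (zeroCount hitCount : Int) :
    funksjon3 minListe divTall zeroCount hitCount
      = funksjon3_alt minListe divTall zeroCount hitCount := by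
  induction minListe generalizing zeroCount hitCount with
  | nil => simp [funksjon3, funksjon3_alt, kthZeroIdx]
  | cons x rest ih =>
    by_cases hx : x = 0
    · subst hx
      by_cases hz : zeroCount + 1 = 2
      · have : zeroCount = 1 := by omega
        subst this
        simp [funksjon3, alt_cons_zero_hit]
      · have hz1 : zeroCount ≠ 1 := by omega
        rw [alt_cons_zero rest divTall zeroCount hitCount hz1, ← ih]
        simp [funksjon3, hz]
    · rw [alt_cons_nonzero x rest divTall zeroCount hitCount hx, ← ih]
      by_cases hneg : x < 0
      · simp [funksjon3, hx, hneg]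
      · simp only [funksjon3, if_neg (by simp [hx] : ¬ (x = 0 ∧ (if x = 0 then zeroCount + 1 else zeroCount) = 2)), if_neg hneg]
        by_cases hodd : PySem.Int.mod x 2 ≠ 0
        · rw [if_pos hodd, if_pos (Or.inr hodd), if_neg hx]
        · have hor : ¬ (x < 0 ∨ PySem.Int.mod x 2 ≠ 0) :=
            fun hc => hc.elim (fun hh => hneg hh) (fun hh => hodd hh)
          rw [if_neg hodd, if_neg hor, if_neg hx]

-- ===== VERDICT (by name: the statement is the Claim_ definition above) =====
theorem funksjon3_spec : Claim_equal_funksjon3 := by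
  intro minListe divTall zeroCount hitCount _
  unfold Spec_funksjon3
  exact funksjon3_eq_alt minListe divTall zeroCount hitCount
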